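-- pv_equiv track=rewrite | github.com/KnowEnG/MetaPath_Analysis | MAPR_characterizeSet.py | checkIfNameHasDuplicate
-- ===== SOURCE A (Python) =====
-- def checkIfNameHasDuplicate(pathName):
-- 	"""
-- 	Check if a meta-path name consecutively contains two of the same edge type.
--
-- 	:param pathName: (str) the MP name, types separated by '-'
-- 	:return: (bool) True if a duplicate occurs, False otherwise
-- 	"""
--
-- 	retBool = False
-- 	pv = pathName.split('-')
-- 	if len(pv) > 1:
-- 		for i in range(1, len(pv)):
-- 			if pv[i] == pv[i - 1]:
-- 				retBool = True
-- 				break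
-- 			# end if
-- 		# end for
-- 	# end if
--
-- 	return retBool
-- ===== SOURCE B (Python) =====
-- def checkIfNameHasDuplicate(pathName):
-- 	"""
-- 	Check if a meta-path name consecutively contains two of the same edge type.
-- 	Single character-level scan: tokens are accumulated between dashes and each
-- 	finished token is compared to the previous one on the fly (no split list).
-- 	"""
-- 	prev = None
-- 	cur = []
-- 	for ch in pathName:
-- 		if ch == '-':
-- 			tok = ''.join(cur)
-- 			if prev is not None and tok == prev:
-- 				return True
-- 			prev = tok
-- 			cur = []
-- 		else:
-- 			cur.append(ch)
-- 	return prev is not None and ''.join(cur) == prev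
-- ===== Notes on version B (the rewrite author's own statement) =====
-- stated objective: alternative
-- what changed: Replaces the split-on-dash plus index loop over the token list by a single character-level scan that accumulates the current token and compares each finished token to its predecessor on the fly, never materialising the split list.
import Mathlib
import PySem

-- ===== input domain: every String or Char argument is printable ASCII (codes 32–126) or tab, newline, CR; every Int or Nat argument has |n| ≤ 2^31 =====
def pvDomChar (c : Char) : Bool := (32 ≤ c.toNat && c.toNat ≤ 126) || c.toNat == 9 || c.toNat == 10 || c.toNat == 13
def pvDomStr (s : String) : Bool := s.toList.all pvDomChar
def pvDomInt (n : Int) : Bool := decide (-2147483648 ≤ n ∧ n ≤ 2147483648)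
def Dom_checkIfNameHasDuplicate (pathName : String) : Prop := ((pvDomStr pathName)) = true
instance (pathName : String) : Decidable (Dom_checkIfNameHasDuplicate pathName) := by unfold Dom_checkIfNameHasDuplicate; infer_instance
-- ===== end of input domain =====

-- B replaces split('-') + an index loop by a single character-level scan comparing
-- each finished token to its predecessor (objective: alternative, same cost).

-- ===== PORT A =====
-- the 'for i in range(1, len(pv))' loop with break, transliterated over the range list
def pvALoop (pv : List String) : List Int → Bool
  | [] => false
  | i :: rest =>
    if PySem.List.pyGet? pv i == PySem.List.pyGet? pv (i - 1) then true
    else pvALoop pv rest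

def checkIfNameHasDuplicate (pathName : String) : Bool :=
  -- pathName.split('-'): sep is the nonempty literal "-", so split? is some; .getD [] is exact here
  let pv := (PySem.Str.split? pathName "-").getD []
  if 1 < pv.length then pvALoop pv (PySem.List.pyRange 1 pv.length 1)
  else false

-- ===== PORT B =====
-- the character scan: prev = previous finished token (none = Python's None), cur = chars of the current token
def pvBScan (prev : Option (List Char)) (cur : List Char) : List Char → Bool
  | [] => prev == some cur
  | c :: rest =>
    if c == '-' then
      if prev == some cur then true
      else pvBScan (some cur) [] rest
    else pvBScan prev (cur ++ [c]) rest

def checkIfNameHasDuplicate_alt (pathName : String) : Bool :=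
  pvBScan none [] pathName.toList

-- ===== PRECONDITION & SPEC =====
def Spec_checkIfNameHasDuplicate (pathName : String) (out : Bool) : Prop := out = checkIfNameHasDuplicate_alt pathName
instance (pathName : String) (out : Bool) : Decidable (Spec_checkIfNameHasDuplicate pathName out) := by unfold Spec_checkIfNameHasDuplicate; infer_instance

-- ===== CLAIM (what is proved, stated in full; the proofs are below) =====
def Claim_equal_checkIfNameHasDuplicate : Prop := ∀ (pathName : String), Dom_checkIfNameHasDuplicate pathName → Spec_checkIfNameHasDuplicate pathName (checkIfNameHasDuplicate pathName)

-- ===== LEMMAS AND PROOFS =====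

-- reference split on '-' (proof-only)
def pvSpl : List Char → List (List Char)
  | [] => [[]]
  | c :: rest =>
    if c = '-' then [] :: pvSpl rest
    else
      match pvSpl rest with
      | t :: ts => (c :: t) :: ts
      | [] => [[c]]

-- "adjacent duplicate" on a token list
def pvAdj : List (List Char) → Bool
  | a :: b :: t => a == b || pvAdj (b :: t)
  | _ => false

def pvAdjS : List String → Bool
  | a :: b :: t => a == b || pvAdjS (b :: t)
  | _ => false

theorem pvSpl_ne_nil (cs : List Char) : pvSpl cs ≠ [] := by
  cases cs with
  | nil => simp [pvSpl]
  | cons c rest =>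
    simp only [pvSpl]
    split
    · simp
    · cases h : pvSpl rest <;> simp

-- prepend a prefix onto the first token
def pvConsTok (p : List Char) : List (List Char) → List (List Char)
  | t :: ts => (p ++ t) :: ts
  | [] => [p]

theorem pvGo_eq (sep : List Char) (hsep : sep = ['-']) :
    ∀ (fuel : Nat) (l cur : List Char) (acc : List (List Char)), l.length < fuel →
      PySem.Chars.splitOn.go sep fuel l cur acc
        = acc.reverse ++ pvConsTok cur.reverse (pvSpl l) := by
  subst hsep
  intro fuel
  induction fuel with
  | zero => intro l cur acc h; omega
  | succ n ih =>
    intro l cur acc h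
    cases l with
    | nil =>
      simp [PySem.Chars.splitOn.go, pvSpl, pvConsTok]
    | cons c rest =>
      by_cases hc : c = '-'
      · subst hc
        rw [show PySem.Chars.splitOn.go ['-'] (n+1) ('-' :: rest) cur acc
              = PySem.Chars.splitOn.go ['-'] n rest [] (cur.reverse :: acc) by
            have hp : (['-'].isPrefixOf ('-' :: rest)) = true := by
              simp [List.isPrefixOf]
            simp [PySem.Chars.splitOn.go, hp]]
        rw [ih rest [] (cur.reverse :: acc) (by simpa using Nat.lt_of_succ_lt_succ h)]
        cases hs : pvSpl rest with
        | nil => exact absurd hs (pvSpl_ne_nil rest)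
        | cons t ts => simp [pvSpl, pvConsTok, hs]
      · rw [show PySem.Chars.splitOn.go ['-'] (n+1) (c :: rest) cur acc
              = PySem.Chars.splitOn.go ['-'] n rest (c :: cur) acc by
            have hp : (['-'].isPrefixOf (c :: rest)) = false := by
              simp [List.isPrefixOf, Ne.symm hc]
            simp [PySem.Chars.splitOn.go, hp]]
        rw [ih rest (c :: cur) acc (by simpa using Nat.lt_of_succ_lt_succ h)]
        cases hs : pvSpl rest with
        | nil => exact absurd hs (pvSpl_ne_nil rest)
        | cons t ts => simp [pvSpl, pvConsTok, hs, hc]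

theorem pvSplitOn_eq (cs : List Char) : PySem.Chars.splitOn cs ['-'] = pvSpl cs := by
  rw [show PySem.Chars.splitOn cs ['-'] = PySem.Chars.splitOn.go ['-'] (cs.length + 1) cs [] [] from rfl]
  rw [pvGo_eq ['-'] rfl (cs.length + 1) cs [] [] (by omega)]
  cases hs : pvSpl cs with
  | nil => exact absurd hs (pvSpl_ne_nil cs)
  | cons t ts => simp [pvConsTok]

theorem pvAdjS_map (l : List (List Char)) : pvAdjS (l.map String.ofList) = pvAdj l := by
  induction l with
  | nil => rfl
  | cons a l ih =>
    cases l with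
    | nil => rfl
    | cons b t =>
      simp only [List.map, pvAdjS, pvAdj] at *
      rw [ih]
      congr 1
      simp [String.ofList_inj]

-- B's scan computes pvAdj of the split, with prev/cur tracking the boundary
theorem pvBScan_eq (cs : List Char) :
    ∀ (prev : Option (List Char)) (cur : List Char),
      pvBScan prev cur cs
        = ((prev == some (cur ++ (pvSpl cs).headI))
            || pvAdj (pvConsTok cur (pvSpl cs))) := by
  induction cs with
  | nil =>
    intro prev cur
    simp [pvBScan, pvSpl, pvConsTok, List.headI, pvAdj]
  | cons c rest ih =>
    intro prev cur
    by_cases hc : c = '-'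
    · subst hc
      rw [show pvBScan prev cur ('-' :: rest)
            = if prev == some cur then true else pvBScan (some cur) [] rest by
          simp [pvBScan]]
      rw [show pvSpl ('-' :: rest) = [] :: pvSpl rest by simp [pvSpl]]
      rw [ih (some cur) []]
      cases hs : pvSpl rest with
      | nil => exact absurd hs (pvSpl_ne_nil rest)
      | cons t ts =>
        simp only [List.headI, pvConsTok, List.nil_append, List.append_nil, pvAdj]
        by_cases hpc : prev = some cur
        · simp [hpc]
        · have : (prev == some (cur ++ [])) = false := by
            simp; simpa using hpc
          simp only [List.append_nil] at this ⊢
          simp [this]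
    · rw [show pvBScan prev cur (c :: rest) = pvBScan prev (cur ++ [c]) rest by
          simp [pvBScan, hc]]
      rw [ih prev (cur ++ [c])]
      rw [show pvSpl (c :: rest)
            = match pvSpl rest with
              | t :: ts => (c :: t) :: ts
              | [] => [[c]] by simp [pvSpl, hc]]
      cases hs : pvSpl rest with
      | nil => exact absurd hs (pvSpl_ne_nil rest)
      | cons t ts => simp [List.headI, pvConsTok]

theorem pvAlt_eq_adj (s : String) :
    checkIfNameHasDuplicate_alt s = pvAdj (pvSpl s.toList) := by
  unfold checkIfNameHasDuplicate_alt
  rw [pvBScan_eq s.toList none []]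
  cases hs : pvSpl s.toList with
  | nil => exact absurd hs (pvSpl_ne_nil s.toList)
  | cons t ts => simp [pvConsTok]

-- A's index loop over pyRange k..len computes pvAdjS of the dropped list
theorem pvALoop_eq (pv : List String) :
    ∀ (n k : Nat), pv.length - k = n → 1 ≤ k →
      pvALoop pv (PySem.List.pyRange (k : Int) (pv.length : Int) 1) = pvAdjS (pv.drop (k - 1)) := by
  intro n
  induction n using Nat.strong_induction_on with
  | _ n ih =>
    intro k hn hk
    by_cases hlt : k < pv.length
    · rw [PySem.List.pyRange_one_cons (by exact_mod_cast hlt)]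
      have hk1 : k - 1 < pv.length := by omega
      have hget : (PySem.List.pyGet? pv (k : Int) == PySem.List.pyGet? pv ((k : Int) - 1))
          = (pv[k]'hlt == pv[k-1]'hk1) := by
        rw [show ((k : Int) - 1) = ((k - 1 : Nat) : Int) by omega]
        rw [PySem.List.pyGet?_natCast, PySem.List.pyGet?_natCast]
        rw [List.getElem?_eq_getElem hlt, List.getElem?_eq_getElem hk1]
        simp
      have hdrop : pv.drop (k - 1) = pv[k-1]'hk1 :: pv.drop k := by
        rw [List.drop_eq_getElem_cons hk1, show k - 1 + 1 = k by omega]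
      have hdrop2 : pv.drop k = pv[k]'hlt :: pv.drop (k + 1) :=
        List.drop_eq_getElem_cons hlt
      rw [show pvALoop pv ((k : Int) :: PySem.List.pyRange ((k : Int) + 1) (pv.length : Int) 1)
            = if PySem.List.pyGet? pv (k : Int) == PySem.List.pyGet? pv ((k : Int) - 1) then true
              else pvALoop pv (PySem.List.pyRange ((k : Int) + 1) (pv.length : Int) 1) from rfl]
      rw [hdrop, hdrop2, pvAdjS, hget]
      by_cases he : pv[k-1]'hk1 = pv[k]'hlt
      · simp [he]
      · rw [if_neg (by simp [Ne.symm he])]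
        rw [show ((k : Int) + 1) = (((k + 1 : Nat) : Int)) by omega]
        rw [ih (pv.length - (k + 1)) (by omega) (k + 1) rfl (by omega)]
        rw [show k + 1 - 1 = k from rfl, hdrop2]
        simp [he]
    · -- range empty, drop has at most one element
      have hle : pv.length ≤ k := by omega
      rw [show PySem.List.pyRange (k : Int) (pv.length : Int) 1 = [] by
        rw [PySem.List.pyRange_one]
        simp [show (((pv.length : Int)) - (k : Int)).toNat = 0 by omega]]
      have hlen : (pv.drop (k - 1)).length ≤ 1 := by
        rw [List.length_drop]; omega
      rw [show pvALoop pv [] = false from rfl]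
      cases hd : pv.drop (k - 1) with
      | nil => rfl
      | cons a t =>
        cases t with
        | nil => rfl
        | cons b t' => rw [hd] at hlen; simp at hlen

theorem pvA_eq_adj (s : String) :
    checkIfNameHasDuplicate s = pvAdj (pvSpl s.toList) := by
  unfold checkIfNameHasDuplicate
  have hpv : (PySem.Str.split? s "-").getD []
      = (pvSpl s.toList).map String.ofList := by
    rw [show PySem.Str.split? s "-"
          = Option.map (fun x => List.map String.ofList x) (PySem.Chars.split? s.toList ['-']) from rfl]
    rw [show PySem.Chars.split? s.toList ['-'] = some (PySem.Chars.splitOn s.toList ['-']) by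
      simp [PySem.Chars.split?]]
    rw [pvSplitOn_eq]
    rfl
  simp only [hpv]
  by_cases h : 1 < ((pvSpl s.toList).map String.ofList).length
  · rw [if_pos h]
    have := pvALoop_eq ((pvSpl s.toList).map String.ofList)
      (((pvSpl s.toList).map String.ofList).length - 1) 1 rfl le_rfl
    simp only [Nat.cast_one] at this
    rw [this]
    simp [pvAdjS_map]
  · rw [if_neg h]
    have hlen : (pvSpl s.toList).length ≤ 1 := by
      simpa using Nat.le_of_not_lt h
    cases hs : pvSpl s.toList with
    | nil => rfl
    | cons t ts =>
      cases ts with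
      | nil => rfl
      | cons b t' => rw [hs] at hlen; simp at hlen

-- ===== VERDICT (by name: the statement is the Claim_ definition above) =====
theorem checkIfNameHasDuplicate_spec : Claim_equal_checkIfNameHasDuplicate := by
  intro s _
  unfold Spec_checkIfNameHasDuplicate
  rw [pvA_eq_adj, pvAlt_eq_adj]
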